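-- pv_equiv track=rewrite | github.com/jsmith04/spicelib | spicelib/editor/spice_editor.py | _first_token_upped
-- ===== SOURCE A (Python) =====
-- def _first_token_upped(line):
--     """
--     (Private function. Not to be used directly)
--     Returns the first non-space character in the line. If a point '.' is found, then it gets the primitive associated.
--     """
--     i = 0
--     while i < len(line) and line[i] in (' ', '\t'):
--         i += 1
--     j = i
--     while i < len(line) and not (line[i] in (' ', '\t')):
--         i += 1
--     return line[j:i].upper()
-- ===== SOURCE B (Python) =====
-- import re
--
-- _FIRST_TOKEN_RE = re.compile(r'[ \t]*([^ \t]*)')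
--
-- def _first_token_upped(line):
--     return _FIRST_TOKEN_RE.match(line).group(1).upper()
-- ===== Notes on version B (the rewrite author's own statement) =====
-- stated objective: idiomatic
-- what changed: Replaces the two manual index-advancing while-loops with a single anchored regular expression [ \t]*([^ \t]*) that skips space/tab and captures the first token in one match.
import Mathlib
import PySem

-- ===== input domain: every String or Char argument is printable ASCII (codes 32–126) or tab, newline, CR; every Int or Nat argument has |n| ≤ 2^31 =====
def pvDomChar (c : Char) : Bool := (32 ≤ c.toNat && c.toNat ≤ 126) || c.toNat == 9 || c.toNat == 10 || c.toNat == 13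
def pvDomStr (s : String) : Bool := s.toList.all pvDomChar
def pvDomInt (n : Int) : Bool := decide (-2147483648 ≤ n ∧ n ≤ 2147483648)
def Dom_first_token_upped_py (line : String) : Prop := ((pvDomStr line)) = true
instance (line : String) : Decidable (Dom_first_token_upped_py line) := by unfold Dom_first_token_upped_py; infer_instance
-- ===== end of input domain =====

-- B replaces A's two manual index-advancing while-loops by one anchored regex
-- r'[ \t]*([^ \t]*)' (ported as dropWhile/takeWhile over the characters); objective: idiomatic.

-- ===== PORT A =====
-- c in (' ', '\t')
def ftuIsSpTab (c : Char) : Bool := c == ' ' || c == '\t'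

-- first while-loop: while i < len(line) and line[i] in (' ', '\t'): i += 1
def ftuLoop1 (cs : List Char) (i : Nat) : Nat :=
  if i < cs.length ∧ ftuIsSpTab (cs.getD i ' ') then ftuLoop1 cs (i + 1) else i
termination_by cs.length - i
decreasing_by omega

-- second while-loop: while i < len(line) and not (line[i] in (' ', '\t')): i += 1
def ftuLoop2 (cs : List Char) (i : Nat) : Nat :=
  if i < cs.length ∧ ¬ ftuIsSpTab (cs.getD i ' ') then ftuLoop2 cs (i + 1) else i
termination_by cs.length - i
decreasing_by omega

def first_token_upped_py (line : String) : String :=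
  let j := ftuLoop1 line.toList 0
  let i := ftuLoop2 line.toList j
  -- line[j:i].upper()
  String.ofList (PySem.Chars.upper (PySem.List.slice line.toList (some (j : Int)) (some (i : Int))))

-- ===== PORT B =====
-- re.match(r'[ \t]*([^ \t]*)', line): the anchored match skips '[ \t]*' (dropWhile),
-- group(1) captures '[^ \t]*' (takeWhile); then .upper().
def first_token_upped_py_alt (line : String) : String :=
  String.ofList (PySem.Chars.upper
    ((line.toList.dropWhile ftuIsSpTab).takeWhile (fun c => !ftuIsSpTab c)))

-- ===== PRECONDITION & SPEC =====
def Spec_first_token_upped_py (line : String) (out : String) : Prop := out = first_token_upped_py_alt line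
instance (line : String) (out : String) : Decidable (Spec_first_token_upped_py line out) := by unfold Spec_first_token_upped_py; infer_instance

-- ===== CLAIM (what is proved, stated in full; the proofs are below) =====
def Claim_equal_first_token_upped_py : Prop := ∀ (line : String), Dom_first_token_upped_py line → Spec_first_token_upped_py line (first_token_upped_py line)

-- ===== LEMMAS AND PROOFS =====

theorem pv_dropWhile_eq_drop (p : Char → Bool) (l : List Char) :
    l.dropWhile p = l.drop (l.takeWhile p).length := by
  induction l with
  | nil => simp
  | cons a l ih => by_cases h : p a <;> simp [h, ih]

theorem pv_take_takeWhile (p : Char → Bool) (l : List Char) :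
    l.take (l.takeWhile p).length = l.takeWhile p := by
  exact (List.prefix_iff_eq_take.mp (List.takeWhile_prefix p)).symm

theorem ftuLoop1_eq (cs : List Char) (i : Nat) :
    ftuLoop1 cs i = i + ((cs.drop i).takeWhile ftuIsSpTab).length := by
  fun_induction ftuLoop1 cs i with
  | case1 i h ih =>
    rw [ih]
    have hd : cs.drop i = cs[i]'h.1 :: cs.drop (i + 1) := List.drop_eq_getElem_cons h.1
    have hg : cs.getD i ' ' = cs[i]'h.1 := List.getD_eq_getElem cs ' ' h.1
    rw [hd, List.takeWhile_cons_of_pos (by rw [← hg]; exact h.2)]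
    simp; omega
  | case2 i h =>
    by_cases hi : i < cs.length
    · have hd : cs.drop i = cs[i]'hi :: cs.drop (i + 1) := List.drop_eq_getElem_cons hi
      have hg : cs.getD i ' ' = cs[i]'hi := List.getD_eq_getElem cs ' ' hi
      have hb : ftuIsSpTab (cs[i]'hi) = false := by
        by_contra hc
        exact h ⟨hi, by rw [hg]; simpa using hc⟩
      rw [hd, List.takeWhile_cons_of_neg (by simp [hb])]
      simp
    · rw [List.drop_eq_nil_of_le (by omega)]
      simp

theorem ftuLoop2_eq (cs : List Char) (i : Nat) :
    ftuLoop2 cs i = i + ((cs.drop i).takeWhile (fun c => !ftuIsSpTab c)).length := by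
  fun_induction ftuLoop2 cs i with
  | case1 i h ih =>
    rw [ih]
    have hd : cs.drop i = cs[i]'h.1 :: cs.drop (i + 1) := List.drop_eq_getElem_cons h.1
    have hg : cs.getD i ' ' = cs[i]'h.1 := List.getD_eq_getElem cs ' ' h.1
    rw [hd, List.takeWhile_cons_of_pos (by rw [← hg]; simpa using h.2)]
    simp; omega
  | case2 i h =>
    by_cases hi : i < cs.length
    · have hd : cs.drop i = cs[i]'hi :: cs.drop (i + 1) := List.drop_eq_getElem_cons hi
      have hg : cs.getD i ' ' = cs[i]'hi := List.getD_eq_getElem cs ' ' hi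
      have hb : ftuIsSpTab (cs[i]'hi) = true := by
        by_contra hc
        exact h ⟨hi, by rw [hg]; simpa using hc⟩
      rw [hd, List.takeWhile_cons_of_neg (by simp [hb])]
      simp
    · rw [List.drop_eq_nil_of_le (by omega)]
      simp

-- ===== VERDICT (by name: the statement is the Claim_ definition above) =====
theorem first_token_upped_py_spec : Claim_equal_first_token_upped_py := by
  intro line _
  show first_token_upped_py line = first_token_upped_py_alt line
  unfold first_token_upped_py first_token_upped_py_alt
  simp only
  set cs := line.toList with hcs
  have h1 : ftuLoop1 cs 0 = (cs.takeWhile ftuIsSpTab).length := by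
    simpa using ftuLoop1_eq cs 0
  have h2 : ftuLoop2 cs (ftuLoop1 cs 0)
      = ftuLoop1 cs 0 + ((cs.dropWhile ftuIsSpTab).takeWhile (fun c => !ftuIsSpTab c)).length := by
    rw [ftuLoop2_eq, h1, ← pv_dropWhile_eq_drop]
  congr 1
  rw [PySem.List.slice_natCast, h2, h1]
  simp only [Nat.add_sub_cancel_left]
  rw [pv_dropWhile_eq_drop ftuIsSpTab cs]
  exact congrArg _ (pv_take_takeWhile _ _)
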